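-- pv_equiv track=rewrite | github.com/NVIDIA-Genomics-Research/DL4VC | tools/candidate_generator.py | remove_multialleles
-- ===== SOURCE A (Python) =====
-- def remove_multialleles(alleles):
--     """
--     Filter alleles so that if more than one candidate is generated for one genomic position the one with
--     the highest AF is chosen.
--     """
--     alleles.sort()
--     alleles_by_position = {}
--     for allele in alleles:
--         pos = str(allele[0]) + "_" + str(allele[1])
--         if pos in alleles_by_position:
--             if alleles_by_position[pos][5] < allele[5]:
--                 alleles_by_position[pos] = allele
--         else:
--             alleles_by_position[pos] = allele
--     return alleles_by_position.values()
-- ===== SOURCE B (Python) =====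
-- def remove_multialleles(alleles):
--     """
--     Filter alleles so that if more than one candidate is generated for one genomic position the one with
--     the highest AF is chosen.
--     """
--     alleles.sort()
--     groups = {}
--     for allele in alleles:
--         groups.setdefault(str(allele[0]) + "_" + str(allele[1]), []).append(allele)
--     return [max(group, key=lambda a: a[5]) for group in groups.values()]
-- ===== Notes on version B (the rewrite author's own statement) =====
-- stated objective: idiomatic
-- what changed: Instead of an online compare-and-replace dict of running winners, B collects all alleles per position key with setdefault into lists and then takes max(group, key=AF) per group in a comprehension (collect-then-reduce; max's first-maximal rule reproduces A's strict-< tie-break).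
import Mathlib
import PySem

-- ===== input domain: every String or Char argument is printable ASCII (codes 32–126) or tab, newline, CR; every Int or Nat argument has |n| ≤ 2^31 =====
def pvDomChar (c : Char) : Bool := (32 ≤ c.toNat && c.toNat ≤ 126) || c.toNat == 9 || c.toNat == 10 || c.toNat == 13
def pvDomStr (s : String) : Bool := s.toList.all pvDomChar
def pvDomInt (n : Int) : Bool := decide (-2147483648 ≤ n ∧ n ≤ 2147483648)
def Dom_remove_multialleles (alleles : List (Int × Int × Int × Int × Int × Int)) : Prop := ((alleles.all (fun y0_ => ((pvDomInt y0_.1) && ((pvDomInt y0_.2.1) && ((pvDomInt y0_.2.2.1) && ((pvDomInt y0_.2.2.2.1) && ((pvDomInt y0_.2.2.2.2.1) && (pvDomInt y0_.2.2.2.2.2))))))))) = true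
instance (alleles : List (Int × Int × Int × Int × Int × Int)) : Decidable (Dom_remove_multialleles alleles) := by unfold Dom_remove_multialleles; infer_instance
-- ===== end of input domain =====

-- B replaces A's online compare-and-replace winner dict by collect-lists-per-key then max-per-group;
-- equivalence is about the RETURN value (both Pythons also sort the argument in place, identically).

abbrev Allele : Type := Int × Int × Int × Int × Int × Int

-- shared helper (both Pythons call alleles.sort()): Python's list.sort() on int 6-tuples is a stable
-- sort under the LEXICOGRAPHIC tuple order; hand-ported here (Lean's `<` on products is pointwise,
-- not lexicographic) as the same stable insertion-sort scheme PySem.List.sorted uses (sorted_eq_foldl_insertBy).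
def pyLexLt (a b : Allele) : Bool :=
  decide (a.1 < b.1 ∨ (a.1 = b.1 ∧ (a.2.1 < b.2.1 ∨ (a.2.1 = b.2.1 ∧
    (a.2.2.1 < b.2.2.1 ∨ (a.2.2.1 = b.2.2.1 ∧ (a.2.2.2.1 < b.2.2.2.1 ∨ (a.2.2.2.1 = b.2.2.2.1 ∧
    (a.2.2.2.2.1 < b.2.2.2.2.1 ∨ (a.2.2.2.2.1 = b.2.2.2.2.1 ∧ a.2.2.2.2.2 < b.2.2.2.2.2))))))))))

def pySortAlleles (alleles : List Allele) : List Allele :=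
  alleles.foldl (fun acc x => PySem.List.insertBy pyLexLt x acc) []

-- pos = str(allele[0]) + "_" + str(allele[1])
def posKey (a : Allele) : String :=
  PySem.Int.toStr a.1 ++ "_" ++ PySem.Int.toStr a.2.1

-- ===== PORT A =====
-- A's loop body: 'if pos in d: if d[pos][5] < allele[5]: d[pos] = allele; else: d[pos] = allele'
-- (the membership test and the d[pos] lookup are the one get?)
def aStep (d : PySem.Dict String Allele) (allele : Allele) : PySem.Dict String Allele :=
  let pos := posKey allele
  match d.get? pos with
  | some cur => if cur.2.2.2.2.2 < allele.2.2.2.2.2 then d.insert pos allele else d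
  | none => d.insert pos allele

def remove_multialleles (alleles : List Allele) : List Allele :=
  ((pySortAlleles alleles).foldl aStep PySem.Dict.empty).values

-- ===== PORT B =====
-- B's loop body: groups.setdefault(pos, []).append(allele) = modify pos [] (· ++ [allele])
def bStep (d : PySem.Dict String (List Allele)) (allele : Allele) : PySem.Dict String (List Allele) :=
  d.modify (posKey allele) [] (fun g => g ++ [allele])

def remove_multialleles_alt (alleles : List Allele) : List Allele :=
  let groups := (pySortAlleles alleles).foldl bStep PySem.Dict.empty
  -- max(group, key=lambda a: a[5]); the .getD default is never used: every group is nonempty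
  groups.values.map (fun g => (PySem.List.max? g (fun a => a.2.2.2.2.2)).getD (0, 0, 0, 0, 0, 0))

-- ===== PRECONDITION & SPEC =====
def Spec_remove_multialleles (alleles : List (Int × Int × Int × Int × Int × Int)) (out : List (Int × Int × Int × Int × Int × Int)) : Prop := out = remove_multialleles_alt alleles
instance (alleles : List (Int × Int × Int × Int × Int × Int)) (out : List (Int × Int × Int × Int × Int × Int)) : Decidable (Spec_remove_multialleles alleles out) := by unfold Spec_remove_multialleles; infer_instance

-- ===== CLAIM (what is proved, stated in full; the proofs are below) =====
def Claim_equal_remove_multialleles : Prop := ∀ (alleles : List (Int × Int × Int × Int × Int × Int)), Dom_remove_multialleles alleles → Spec_remove_multialleles alleles (remove_multialleles alleles)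

-- ===== LEMMAS AND PROOFS =====

-- the reduction step shared by A's running winner and PySem.List.max?
def mStep (o : Option Allele) (a : Allele) : Option Allele :=
  match o with
  | none => some a
  | some m => if m.2.2.2.2.2 < a.2.2.2.2.2 then some a else some m

lemma aFold_get? (ys : List Allele) (d : PySem.Dict String Allele) (c : String) :
    (ys.foldl aStep d).get? c =
      (ys.filter (fun a => posKey a == c)).foldl mStep (d.get? c) := by
  induction ys generalizing d with
  | nil => rfl
  | cons a ys ih =>
    simp only [List.foldl_cons, List.filter_cons]
    by_cases hk : posKey a = c
    · subst hk
      simp only [beq_self_eq_true, if_pos, List.foldl_cons]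
      rw [ih]
      congr 1
      simp only [aStep, mStep]
      cases h : d.get? (posKey a) with
      | none => simp [PySem.Dict.get?_insert_self]
      | some cur =>
          dsimp only
          split_ifs with hlt
          · simp [PySem.Dict.get?_insert_self]
          · simp [h]
    · have hb : (posKey a == c) = false := by simp [hk]
      simp only [hb, Bool.false_eq_true, if_neg, not_false_iff]
      rw [ih]
      congr 1
      simp only [aStep]
      cases h : d.get? (posKey a) with
      | none => exact PySem.Dict.get?_insert_of_ne _ _ (Ne.symm hk)
      | some cur =>
          dsimp only
          split_ifs with hlt
          · exact PySem.Dict.get?_insert_of_ne _ _ (Ne.symm hk)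
          · rfl

lemma bFold_getD (ys : List Allele) (d : PySem.Dict String (List Allele)) (c : String) :
    (ys.foldl bStep d).getD c [] =
      d.getD c [] ++ ys.filter (fun a => posKey a == c) := by
  induction ys generalizing d with
  | nil => simp
  | cons a ys ih =>
    simp only [List.foldl_cons, List.filter_cons]
    rw [ih]
    by_cases hk : posKey a = c
    · subst hk
      simp [bStep, PySem.Dict.getD_modify_self]
    · have hb : (posKey a == c) = false := by simp [hk]
      simp only [hb, Bool.false_eq_true, if_neg, not_false_iff]
      rw [bStep, PySem.Dict.getD_modify_of_ne _ _ _ (Ne.symm hk)]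

lemma aFold_keys (ys : List Allele) (d : PySem.Dict String Allele) :
    (ys.foldl aStep d).keys = PySem.Set.update d.keys (ys.map posKey) := by
  induction ys generalizing d with
  | nil => rfl
  | cons a ys ih =>
    simp only [List.foldl_cons, List.map_cons, PySem.Set.update, ih]
    congr 1
    simp only [aStep, PySem.Set.add]
    cases h : d.get? (posKey a) with
    | none =>
        have hc : d.contains (posKey a) = false :=
          (PySem.Dict.get?_eq_none_iff_contains d (posKey a)).mp h
        have hmem : (posKey a) ∉ d.keys := by
          intro hm
          rw [← PySem.Dict.contains_iff_mem_keys] at hm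
          rw [hm] at hc; cases hc
        have hcl : PySem.Set.contains d.keys (posKey a) = false := by
          simpa [PySem.Set.contains] using hmem
        rw [PySem.Dict.keys_insert_of_not_contains d _ hc, hcl]
        simp
    | some cur =>
        have hc : d.contains (posKey a) = true := by
          rw [PySem.Dict.contains_eq_isSome_get?, h]; rfl
        have hmem : (posKey a) ∈ d.keys := (PySem.Dict.contains_iff_mem_keys d _).mp hc
        have hcl : PySem.Set.contains d.keys (posKey a) = true := by
          simpa [PySem.Set.contains] using hmem
        dsimp only
        split_ifs with hlt <;> first | rfl | simp_all [PySem.Dict.keys_insert_of_contains d _ hc]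

lemma aFold_nodup_keys (ys : List Allele) (d : PySem.Dict String Allele)
    (h : d.keys.Nodup) : (ys.foldl aStep d).keys.Nodup := by
  induction ys generalizing d with
  | nil => exact h
  | cons a ys ih =>
    refine ih _ ?_
    simp only [aStep]
    cases hg : d.get? (posKey a) with
    | none => exact PySem.Dict.nodup_keys_insert _ _ _ h
    | some cur =>
        dsimp only
        split_ifs
        · exact PySem.Dict.nodup_keys_insert _ _ _ h
        · exact h

-- A's running winner (seeded none) IS PySem.List.max? of the group, step for step
lemma mFold_eq_max? (l : List Allele) :
    l.foldl mStep none = PySem.List.max? l (fun a => a.2.2.2.2.2) := by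
  rw [PySem.List.max?]
  generalize (none : Option Allele) = o
  induction l generalizing o with
  | nil => rfl
  | cons a t ih =>
    simp only [List.foldl_cons]
    rw [← ih]
    congr 1
    cases o <;> rfl

theorem remove_multialleles_eq (alleles : List Allele) :
    remove_multialleles alleles = remove_multialleles_alt alleles := by
  simp only [remove_multialleles, remove_multialleles_alt]
  set ys := pySortAlleles alleles with hys
  have hka : (ys.foldl aStep PySem.Dict.empty).keys = PySem.Set.update [] (ys.map posKey) := by
    rw [aFold_keys]; rfl
  have hkb : (ys.foldl bStep PySem.Dict.empty).keys = PySem.Set.update [] (ys.map posKey) := by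
    have := PySem.Dict.keys_foldl_modify_key ys posKey ([] : List Allele)
      (fun _ a g => g ++ [a]) PySem.Dict.empty
    simpa [bStep] using this
  have hnda : (ys.foldl aStep PySem.Dict.empty).keys.Nodup :=
    aFold_nodup_keys _ _ (by simp [PySem.Dict.keys_empty])
  have hndb : (ys.foldl bStep PySem.Dict.empty).keys.Nodup := by
    have := PySem.Dict.nodup_keys_foldl_modify_key ys posKey ([] : List Allele)
      (fun _ a g => g ++ [a]) PySem.Dict.empty (by simp [PySem.Dict.keys_empty])
    simpa [bStep] using this
  rw [PySem.Dict.values_eq_map_keys _ hnda ((0, 0, 0, 0, 0, 0) : Allele),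
      PySem.Dict.values_eq_map_keys _ hndb ([] : List Allele),
      hka, hkb, List.map_map]
  refine List.map_congr_left (fun c _ => ?_)
  have ha : (ys.foldl aStep PySem.Dict.empty).getD c ((0, 0, 0, 0, 0, 0) : Allele)
      = (PySem.List.max? (ys.filter (fun a => posKey a == c)) (fun a => a.2.2.2.2.2)).getD
          ((0, 0, 0, 0, 0, 0) : Allele) := by
    rw [PySem.Dict.getD_eq_get?_getD, aFold_get?, PySem.Dict.get?_empty, mFold_eq_max?]
  have hb : (ys.foldl bStep PySem.Dict.empty).getD c [] = ys.filter (fun a => posKey a == c) := by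
    rw [bFold_getD]; simp
  simp only [Function.comp_apply, ha, hb]

-- ===== VERDICT (by name: the statement is the Claim_ definition above) =====
theorem remove_multialleles_spec : Claim_equal_remove_multialleles := by
  intro alleles _
  exact remove_multialleles_eq alleles
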